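-- pv_equiv track=rewrite | github.com/eckertantonia/prog3 | OnlineTests/py/Ueb2022/a3/a3.py | isHawaiian
-- ===== SOURCE A (Python) =====
-- def isHawaiian(w):
--     """
--     Bitte ergänzen
--     """
--     vokale = "AEIOUaeiou"
--     kons = "HKLMNPWhklmnpw\'"
--
--     # Check 1: nur hawaiianisches Alphabet
--     for b in w:
--         if b not in vokale and b not in kons:
--             return False
--
--     # Check 2: endet mit Vokal
--     if w[-1] in kons:
--         return False
--
--     # Check 3: auf Kons folgt Vok
--     for i in range(len(w)):
--         if w[i] in kons:
--             if w[i+1] in kons: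
--                 return False
--
--         # Check 4: Silbenende kein Kons: wird mit Check 3 schon getestet
--
--     return True
-- ===== SOURCE B (Python) =====
-- def isHawaiian(w):
--     """Single pass with a remembered 'previous char was consonant' flag."""
--     vokale = "AEIOUaeiou"
--     kons = "HKLMNPWhklmnpw'"
--     prev_kons = False
--     for c in w:
--         if c in vokale:
--             prev_kons = False
--         elif c in kons:
--             if prev_kons:
--                 return False
--             prev_kons = True
--         else:
--             return False
--     return not prev_kons
-- ===== Notes on version B (the rewrite author's own statement) =====
-- stated objective: simpler
-- what changed: B replaces A's three separate scans (alphabet check, last-char check, index-based lookahead w[i+1]) with one pass carrying a prev-is-consonant flag; the final last-char-must-be-a-vowel test falls out of the flag.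
-- crash fix: On the empty string A raises IndexError at w[-1]; B returns True (the empty word vacuously satisfies all the checks). — e.g. on isHawaiian(""): A raises IndexError, B returns true
import Mathlib
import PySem

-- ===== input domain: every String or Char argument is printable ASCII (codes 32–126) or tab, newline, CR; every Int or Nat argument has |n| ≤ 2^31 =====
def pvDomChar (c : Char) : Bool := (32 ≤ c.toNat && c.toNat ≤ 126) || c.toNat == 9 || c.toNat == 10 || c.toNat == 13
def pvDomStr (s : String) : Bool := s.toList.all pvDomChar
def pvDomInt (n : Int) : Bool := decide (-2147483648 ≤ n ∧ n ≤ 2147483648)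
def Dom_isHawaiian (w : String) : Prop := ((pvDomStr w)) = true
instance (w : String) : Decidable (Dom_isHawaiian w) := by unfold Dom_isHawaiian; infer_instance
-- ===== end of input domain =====

-- B: one pass with a prev-is-consonant flag instead of A's three scans with an indexed lookahead; objective: simpler.


-- ===== PORT A =====
-- 'b in vokale' / 'b in kons': membership of a char in the two constant strings
def hawVok (c : Char) : Bool := ['A','E','I','O','U','a','e','i','o','u'].contains c
def hawKons (c : Char) : Bool := ['H','K','L','M','N','P','W','h','k','l','m','n','p','w','\''].contains c

-- Check 1: 'for b in w: if b not in vokale and b not in kons: return False'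
def check1 : List Char → Bool
  | [] => true
  | c :: cs => if ¬ hawVok c ∧ ¬ hawKons c then false else check1 cs

-- Check 3: 'for i in range(len(w)): if w[i] in kons: if w[i+1] in kons: return False'.
-- The default ' ' of pyGetD is never read on inputs reaching this loop: if w[i] is a
-- consonant at i = len-1 the function already returned False at Check 2.
def check3Loop (l : List Char) : List Int → Bool
  | [] => true
  | i :: is =>
    if hawKons (PySem.List.pyGetD l i ' ') then
      if hawKons (PySem.List.pyGetD l (i + 1) ' ') then false
      else check3Loop l is
    else check3Loop l is

def isHawaiian (w : String) : Bool :=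
  let l := w.toList
  if check1 l = false then false
  else
    match PySem.List.pyGet? l (-1) with   -- w[-1]; none = IndexError on empty w (outside Pre_)
    | none => false
    | some c =>
      if hawKons c then false
      else check3Loop l (PySem.List.pyRange 0 (l.length : Int) 1)

-- ===== PORT B =====
-- single pass; prev = "previous char was a consonant"; 'return not prev_kons' at the end
def altLoop : List Char → Bool → Bool
  | [], prev => !prev
  | c :: cs, prev =>
    if hawVok c then altLoop cs false
    else if hawKons c then (if prev then false else altLoop cs true)
    else false

def isHawaiian_alt (w : String) : Bool := altLoop w.toList false

-- ===== PRECONDITION & SPEC =====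
-- Pre_ excludes exactly the empty string, on which A raises IndexError at w[-1].
def Pre_isHawaiian (w : String) : Prop := w.toList ≠ []
instance (w : String) : Decidable (Pre_isHawaiian w) := by unfold Pre_isHawaiian; infer_instance
def pvWitness_isHawaiian : String := "Aloha"

-- On the empty string A raises IndexError at w[-1]; B returns true (vacuously legal word).
def Raises_isHawaiian (w : String) : Prop := w.toList = []
instance (w : String) : Decidable (Raises_isHawaiian w) := by unfold Raises_isHawaiian; infer_instance
def pvRaiseWitness_isHawaiian : String := ""
def pvRaiseWitnessOut_isHawaiian : Bool := true

def Spec_isHawaiian (w : String) (out : Bool) : Prop := out = isHawaiian_alt w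
instance (w : String) (out : Bool) : Decidable (Spec_isHawaiian w out) := by unfold Spec_isHawaiian; infer_instance

-- ===== CLAIM (what is proved, stated in full; the proofs are below) =====
def Claim_equal_isHawaiian : Prop := ∀ (w : String), Dom_isHawaiian w → Pre_isHawaiian w → Spec_isHawaiian w (isHawaiian w)
def Claim_raises_isHawaiian : Prop := (∀ (w : String), Dom_isHawaiian w → Raises_isHawaiian w → ¬ Pre_isHawaiian w) ∧ (Dom_isHawaiian (pvRaiseWitness_isHawaiian) ∧ Raises_isHawaiian (pvRaiseWitness_isHawaiian) ∧ isHawaiian_alt (pvRaiseWitness_isHawaiian) = pvRaiseWitnessOut_isHawaiian)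

-- ===== LEMMAS AND PROOFS =====

theorem vok_not_kons (c : Char) (h : hawVok c = true) : hawKons c = false := by
  simp [hawVok] at h
  rcases h with h|h|h|h|h|h|h|h|h|h <;> subst h <;> decide

-- adjacency form of Check 3: no consonant directly followed by a consonant
def adjChk : List Char → Bool
  | [] => true
  | [_] => true
  | a :: b :: rest => if hawKons a && hawKons b then false else adjChk (b :: rest)

theorem check3_drop (l : List Char) :
    ∀ k : Nat, check3Loop l (PySem.List.pyRange (k : Int) (l.length : Int) 1) = adjChk (l.drop k) := by
  suffices H : ∀ n k, l.length - k = n →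
      check3Loop l (PySem.List.pyRange (k : Int) (l.length : Int) 1) = adjChk (l.drop k) by
    exact fun k => H _ k rfl
  intro n
  induction n with
  | zero =>
      intro k hk
      have hle : l.length ≤ k := by omega
      rw [PySem.List.pyRange_one_eq_nil (by exact_mod_cast hle), List.drop_eq_nil_of_le hle]
      rfl
  | succ n ih =>
      intro k hk
      have hklt : k < l.length := by omega
      rw [PySem.List.pyRange_one_cons (by exact_mod_cast hklt)]
      have hcast : (k : Int) + 1 = ((k + 1 : Nat) : Int) := by push_cast; ring
      have hdk : l.drop k = l[k] :: l.drop (k + 1) := by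
        rw [List.drop_eq_getElem_cons hklt]
      have hgk : l.getD k ' ' = l[k] := List.getD_eq_getElem l ' ' hklt
      have hih := ih (k + 1) (by omega)
      simp only [check3Loop, hcast, PySem.List.pyGetD_natCast, hgk, hih, hdk]
      rcases hd : l.drop (k + 1) with _ | ⟨b, rest⟩
      · have h1 : l.length ≤ k + 1 := by
          have := congrArg List.length hd
          simp at this; omega
        have hnone : l[k + 1]? = none := by rw [List.getElem?_eq_none_iff]; omega
        simp [adjChk, hnone, hawKons]
      · have h1 : k + 1 < l.length := by
          have := congrArg List.length hd
          simp at this; omega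
        have hg1 : l.getD (k + 1) ' ' = b := by
          rw [List.getD_eq_getElem l ' ' h1]
          have : (l.drop (k + 1))[0]'(by simp [hd]) = b := by simp [hd]
          simpa [List.getElem_drop] using this
        simp only [hg1, adjChk]
        by_cases hka : hawKons l[k] <;> by_cases hkb : hawKons b <;> simp [hka, hkb]

theorem altLoop_true (c : Char) (cs : List Char) :
    altLoop (c :: cs) true = (!hawKons c && altLoop (c :: cs) false) := by
  by_cases hv : hawVok c
  · simp [altLoop, hv, vok_not_kons c hv]
  · by_cases hkc : hawKons c <;> simp [altLoop, hv, hkc]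

theorem altLoop_char (l : List Char) :
    altLoop l false = (check1 l && !hawKons (l.getLastD ' ') && adjChk l) := by
  induction l with
  | nil => rfl
  | cons c1 cs ih =>
      rcases cs with _ | ⟨c2, cs2⟩
      · by_cases hv : hawVok c1
        · simp [altLoop, check1, adjChk, hv, vok_not_kons c1 hv]
        · by_cases hk : hawKons c1 <;> simp [altLoop, check1, adjChk, hv, hk]
      · by_cases hv : hawVok c1
        · have hk1 : hawKons c1 = false := vok_not_kons c1 hv
          rw [show altLoop (c1 :: c2 :: cs2) false = altLoop (c2 :: cs2) false by
            simp [altLoop, hv], ih]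
          simp [check1, adjChk, hv, hk1]
        · by_cases hk : hawKons c1
          · rw [show altLoop (c1 :: c2 :: cs2) false = altLoop (c2 :: cs2) true by
              simp [altLoop, hv, hk]]
            rw [altLoop_true, ih]
            by_cases hk2 : hawKons c2 <;>
              simp [check1, adjChk, hv, hk, hk2]
          · simp [altLoop, check1, hv, hk]

theorem main_equiv (w : String) (hpre : w.toList ≠ []) : isHawaiian w = isHawaiian_alt w := by
  unfold isHawaiian isHawaiian_alt
  set l := w.toList with hl
  obtain ⟨a, ha⟩ := List.getLast?_isSome.mpr hpre |> Option.isSome_iff_exists.mp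
  have hlast : l.getLastD ' ' = a := by
    simp [List.getLastD_eq_getLast?, ha]
  have hget : PySem.List.pyGet? l (-1) = some a := by
    rw [PySem.List.pyGet?_neg_one, ha]
  have hc3 : check3Loop l (PySem.List.pyRange 0 (l.length : Int) 1) = adjChk l := by
    have := check3_drop l 0
    simpa using this
  rw [altLoop_char, hlast]
  by_cases h1 : check1 l
  · simp only [h1, Bool.true_eq_false, if_false, hget]
    by_cases hk : hawKons a <;> simp [hk, hc3]
  · simp [h1]

-- ===== VERDICT (by name: the statement is the Claim_ definition above) =====
theorem isHawaiian_spec : Claim_equal_isHawaiian := by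
  intro w _ hpre
  unfold Spec_isHawaiian
  exact main_equiv w hpre

theorem isHawaiian_raises : Claim_raises_isHawaiian := by
  unfold Claim_raises_isHawaiian
  exact ⟨fun w _ hr hp => hp hr, by decide⟩

-- self-check: the raise-witness output literal, projected from the theorem above
theorem raises_witness_ok : isHawaiian_alt pvRaiseWitness_isHawaiian = pvRaiseWitnessOut_isHawaiian :=
  isHawaiian_raises.2.2.2
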